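-- pv_equiv track=rewrite | github.com/alfredholmes/amb_job_locations | Data Analysis/Enterprise Prediction/Gibrat Process/growth_model_2_rvs.py | sort_companies
-- ===== SOURCE A (Python) =====
-- def sort_companies(companies, local_authorities, sic_codes):
--
--     bins = {la: {sic: {} for sic in sic_codes} for la in local_authorities}
--     for company in companies:
--         if company['age'] in bins[company['la']][company['sic']]:
--             bins[company['la']][company['sic']][company['age']] += 1
--         else:
--             bins[company['la']][company['sic']][company['age']] = 1
--     return bins
-- ===== SOURCE B (Python) =====
-- def sort_companies(companies, local_authorities, sic_codes):
--     def cell(la, sic):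
--         counts = {}
--         for c in companies:
--             if c['la'] == la and c['sic'] == sic:
--                 counts[c['age']] = counts.get(c['age'], 0) + 1
--         return counts
--     return {la: {sic: cell(la, sic) for sic in sic_codes} for la in local_authorities}
-- ===== Notes on version B (the rewrite author's own statement) =====
-- stated objective: alternative
-- what changed: B replaces A's single pass that mutates a pre-built nested dict in place by an immutable nested dict comprehension over the (la, sic) key skeleton whose every cell is counted by its own independent filtered pass over the companies.
import Mathlib
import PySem

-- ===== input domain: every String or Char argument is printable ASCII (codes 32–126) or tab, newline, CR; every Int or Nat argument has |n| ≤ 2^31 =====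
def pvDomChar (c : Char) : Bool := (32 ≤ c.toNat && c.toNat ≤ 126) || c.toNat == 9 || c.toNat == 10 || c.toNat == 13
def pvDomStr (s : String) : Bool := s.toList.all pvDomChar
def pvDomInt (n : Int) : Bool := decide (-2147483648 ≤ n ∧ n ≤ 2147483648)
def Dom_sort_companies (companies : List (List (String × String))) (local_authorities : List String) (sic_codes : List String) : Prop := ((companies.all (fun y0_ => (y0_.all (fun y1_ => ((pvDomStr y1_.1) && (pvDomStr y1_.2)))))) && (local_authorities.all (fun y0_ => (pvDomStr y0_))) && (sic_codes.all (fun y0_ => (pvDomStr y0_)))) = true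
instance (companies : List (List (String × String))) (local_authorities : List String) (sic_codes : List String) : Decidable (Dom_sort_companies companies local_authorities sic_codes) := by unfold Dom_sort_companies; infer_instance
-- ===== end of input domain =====

-- B replaces A's single in-place-mutation pass over a pre-built nested dict by an immutable nested
-- comprehension whose every (la, sic) cell is counted by its own filtered pass (objective: alternative).

-- ===== PORT A =====
-- company['k'] (always present under Pre_; Python raises KeyError on a missing key)
def pvLookup (c : List (String × String)) (k : String) : String :=
  (PySem.Dict.mk c).getD k ""

-- 'if age in d: d[age] += 1 else: d[age] = 1'
def pvBumpA (d : PySem.Dict String Int) (age : String) : PySem.Dict String Int :=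
  match d.get? age with
  | some v => d.insert age (v + 1)
  | none   => d.insert age 1

-- the loop body: in-place update of bins[la][sic]; under Pre_ both keys are present
-- (Dict.modify on a present key is exactly the in-place update; Python raises KeyError otherwise)
def pvStepA (bins : PySem.Dict String (PySem.Dict String (PySem.Dict String Int)))
    (c : List (String × String)) : PySem.Dict String (PySem.Dict String (PySem.Dict String Int)) :=
  bins.modify (pvLookup c "la") PySem.Dict.empty
    (fun d1 => d1.modify (pvLookup c "sic") PySem.Dict.empty
      (fun d2 => pvBumpA d2 (pvLookup c "age")))

-- nested dicts rendered as the association lists of the type convention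
def pvToList (b : PySem.Dict String (PySem.Dict String (PySem.Dict String Int))) :
    List (String × List (String × List (String × Int))) :=
  b.items.map (fun p => (p.1, p.2.items.map (fun q => (q.1, q.2.items))))

def sort_companies (companies : List (List (String × String))) (local_authorities : List String) (sic_codes : List String) : List (String × List (String × List (String × Int))) :=
  let bins0 := local_authorities.foldl
    (fun b la => b.insert la (sic_codes.foldl (fun d sic => d.insert sic PySem.Dict.empty) PySem.Dict.empty))
    PySem.Dict.empty
  pvToList (companies.foldl pvStepA bins0)

-- ===== PORT B =====
-- cell(la, sic): one filtered counting pass over companies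
def pvCell (companies : List (List (String × String))) (la sic : String) : PySem.Dict String Int :=
  companies.foldl
    (fun counts c =>
      if pvLookup c "la" == la && pvLookup c "sic" == sic then
        counts.insert (pvLookup c "age") (counts.getD (pvLookup c "age") 0 + 1)
      else counts)
    PySem.Dict.empty

def sort_companies_alt (companies : List (List (String × String))) (local_authorities : List String) (sic_codes : List String) : List (String × List (String × List (String × Int))) :=
  pvToList (local_authorities.foldl
    (fun b la => b.insert la (sic_codes.foldl
      (fun d sic => d.insert sic (pvCell companies la sic)) PySem.Dict.empty))
    PySem.Dict.empty)

-- ===== PRECONDITION & SPEC =====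
-- Pre_ = exactly the inputs where Python A returns: every company has the keys 'la', 'sic', 'age'
-- and its 'la'/'sic' values occur in local_authorities/sic_codes (otherwise A raises KeyError).
def Pre_sort_companies (companies : List (List (String × String))) (local_authorities : List String) (sic_codes : List String) : Prop :=
  ∀ c ∈ companies,
    (PySem.Dict.mk c).contains "la" = true ∧
    (PySem.Dict.mk c).contains "sic" = true ∧
    (PySem.Dict.mk c).contains "age" = true ∧
    (PySem.Dict.mk c).getD "la" "" ∈ local_authorities ∧
    (PySem.Dict.mk c).getD "sic" "" ∈ sic_codes
instance (companies : List (List (String × String))) (local_authorities : List String) (sic_codes : List String) : Decidable (Pre_sort_companies companies local_authorities sic_codes) := by unfold Pre_sort_companies; infer_instance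

def pvWitness_sort_companies : (List (List (String × String))) × List String × List String :=
  ([[("la", "A"), ("sic", "1"), ("age", "9")], [("la", "B"), ("sic", "1"), ("age", "9")]], ["A", "B"], ["1", "2"])

def Spec_sort_companies (companies : List (List (String × String))) (local_authorities : List String) (sic_codes : List String) (out : List (String × List (String × List (String × Int)))) : Prop := out = sort_companies_alt companies local_authorities sic_codes
instance (companies : List (List (String × String))) (local_authorities : List String) (sic_codes : List String) (out : List (String × List (String × List (String × Int)))) : Decidable (Spec_sort_companies companies local_authorities sic_codes out) := by unfold Spec_sort_companies; infer_instance

-- ===== CLAIM (what is proved, stated in full; the proofs are below) =====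
def Claim_equal_sort_companies : Prop := ∀ (companies : List (List (String × String))) (local_authorities : List String) (sic_codes : List String), Dom_sort_companies companies local_authorities sic_codes → Pre_sort_companies companies local_authorities sic_codes → Spec_sort_companies companies local_authorities sic_codes (sort_companies companies local_authorities sic_codes)

-- ===== LEMMAS AND PROOFS =====

-- a dict built by inserting the value 'v k' at every key of l
def pvIns {V : Type} (l : List String) (v : String → V) (d0 : PySem.Dict String V) :
    PySem.Dict String V :=
  l.foldl (fun b k => b.insert k (v k)) d0

-- B's nested structure, as a function of the companies consumed so far
def pvN (cs : List (List (String × String))) (las sics : List String) :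
    PySem.Dict String (PySem.Dict String (PySem.Dict String Int)) :=
  pvIns las (fun la => pvIns sics (fun sic => pvCell cs la sic) PySem.Dict.empty) PySem.Dict.empty

lemma pv_getD_pvIns {V : Type} (l : List String) (v : String → V) (d0 : PySem.Dict String V)
    (x : String) (dflt : V) :
    (pvIns l v d0).getD x dflt = if x ∈ l then v x else d0.getD x dflt := by
  induction l generalizing d0 with
  | nil => simp [pvIns]
  | cons k t ih =>
    simp only [pvIns, List.foldl_cons] at *
    rw [ih, PySem.Dict.getD_insert]
    by_cases hx : x ∈ t <;> by_cases hk : x = k <;> simp [hx, hk]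

lemma pv_keys_pvIns {V : Type} (l : List String) (v : String → V) (d0 : PySem.Dict String V) :
    (pvIns l v d0).keys = PySem.Set.update d0.keys l :=
  PySem.Dict.keys_foldl_insert l (fun _ k => v k) d0

lemma pv_nodup_pvIns {V : Type} (l : List String) (v : String → V) :
    (pvIns l v PySem.Dict.empty).keys.Nodup :=
  PySem.Dict.nodup_keys_foldl_insert l (fun _ k => v k) PySem.Dict.empty (by simp)

lemma pv_ins_congr {V : Type} (l : List String) (v w : String → V) (d0 : PySem.Dict String V)
    (h : ∀ k ∈ l, v k = w k) : pvIns l v d0 = pvIns l w d0 := by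
  apply PySem.List.foldl_congr_mem
  intro acc x hx
  rw [h x hx]

-- in-place update at a key of the skeleton = the same skeleton with the value function updated
lemma pv_mod {V : Type} (l : List String) (key : String) (hk : key ∈ l) (dflt : V) (F : V → V)
    (v : String → V) :
    (pvIns l v PySem.Dict.empty).modify key dflt F
      = pvIns l (fun k => if k = key then F (v k) else v k) PySem.Dict.empty := by
  have hkeys : (pvIns l v PySem.Dict.empty).keys = PySem.Set.update [] l := by
    rw [pv_keys_pvIns]; simp
  have hcon : (pvIns l v PySem.Dict.empty).contains key = true := by
    rw [PySem.Dict.contains_iff_mem_keys, hkeys, PySem.Set.mem_update]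
    exact Or.inr hk
  have hnodL : ((pvIns l v PySem.Dict.empty).modify key dflt F).keys.Nodup := by
    rw [PySem.Dict.keys_modify, PySem.Dict.keys_insert_of_contains _ _ hcon]
    exact pv_nodup_pvIns l v
  apply PySem.Dict.ext
  rw [PySem.Dict.items_eq_map_keys _ hnodL dflt,
      PySem.Dict.items_eq_map_keys _ (pv_nodup_pvIns l _) dflt]
  have hkeysL : ((pvIns l v PySem.Dict.empty).modify key dflt F).keys
      = (pvIns l (fun k => if k = key then F (v k) else v k) PySem.Dict.empty).keys := by
    rw [PySem.Dict.keys_modify, PySem.Dict.keys_insert_of_contains _ _ hcon, hkeys,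
        pv_keys_pvIns]; simp
  rw [hkeysL]
  apply List.map_congr_left
  intro x hx
  have hxl : x ∈ l := by
    rw [pv_keys_pvIns] at hx
    simpa [PySem.Set.mem_update] using hx
  rw [PySem.Dict.getD_modify, pv_getD_pvIns, pv_getD_pvIns, pv_getD_pvIns]
  by_cases hxk : x = key
  · subst hxk; simp [hxl]
  · simp [hxk, hxl]

-- one company step on A's side = extending every affected cell on B's side
lemma pv_bump_eq (d : PySem.Dict String Int) (age : String) :
    pvBumpA d age = d.insert age (d.getD age 0 + 1) := by
  cases hg : d.get? age <;> simp [pvBumpA, hg, PySem.Dict.getD_eq_get?_getD]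

lemma pv_step (las sics : List String) (cs : List (List (String × String)))
    (c : List (String × String)) (hla : pvLookup c "la" ∈ las) (hsic : pvLookup c "sic" ∈ sics) :
    pvStepA (pvN cs las sics) c = pvN (cs ++ [c]) las sics := by
  have hcell : ∀ la sic, pvCell (cs ++ [c]) la sic =
      if (pvLookup c "la" == la && pvLookup c "sic" == sic) then
        (pvCell cs la sic).insert (pvLookup c "age")
          ((pvCell cs la sic).getD (pvLookup c "age") 0 + 1)
      else pvCell cs la sic := by
    intro la sic
    simp only [pvCell, List.foldl_append, List.foldl_cons, List.foldl_nil]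
  show ((pvIns las _ _).modify (pvLookup c "la") PySem.Dict.empty _) = _
  rw [pv_mod las (pvLookup c "la") hla]
  apply pv_ins_congr
  intro la hlamem
  by_cases h1 : la = pvLookup c "la"
  · subst h1
    rw [if_pos rfl, pv_mod sics (pvLookup c "sic") hsic]
    apply pv_ins_congr
    intro sic hsicmem
    by_cases h2 : sic = pvLookup c "sic"
    · subst h2
      rw [if_pos rfl, hcell, if_pos (by simp), pv_bump_eq]
    · have hf : (pvLookup c "sic" == sic) = false :=
        beq_eq_false_iff_ne.mpr (fun h => h2 h.symm)
      rw [if_neg h2, hcell, if_neg (by simp [hf])]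
  · have hf : (pvLookup c "la" == la) = false :=
      beq_eq_false_iff_ne.mpr (fun h => h1 h.symm)
    rw [if_neg h1]
    apply pv_ins_congr
    intro sic hsicmem
    rw [hcell, if_neg (by simp [hf])]

lemma pv_main (las sics : List String) (cs : List (List (String × String)))
    (h : ∀ c ∈ cs, pvLookup c "la" ∈ las ∧ pvLookup c "sic" ∈ sics) :
    cs.foldl pvStepA (pvN [] las sics) = pvN cs las sics := by
  induction cs using List.reverseRecOn with
  | nil => rfl
  | append_singleton cs c ih =>
    rw [List.foldl_append, List.foldl_cons, List.foldl_nil,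
        ih (fun c' hc' => h c' (List.mem_append_left _ hc'))]
    exact pv_step las sics cs c
      (h c (List.mem_append_right _ (List.mem_singleton_self c))).1
      (h c (List.mem_append_right _ (List.mem_singleton_self c))).2

-- ===== VERDICT (by name: the statement is the Claim_ definition above) =====
theorem sort_companies_spec : Claim_equal_sort_companies := by
  intro companies las sics _dom hpre
  unfold Spec_sort_companies
  show pvToList (companies.foldl pvStepA (pvN [] las sics)) = _
  rw [pv_main las sics companies
    (fun c hc => ⟨(hpre c hc).2.2.2.1, (hpre c hc).2.2.2.2⟩)]
  rfl
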